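-- pv_equiv track=rewrite | github.com/Rakesh-005/GFG | Difficulty: Medium/Cutting Binary String/cutting-binary-string.py | is_power_of_five
-- ===== SOURCE A (Python) =====
-- def is_power_of_five(binary_str: str) -> bool:
--         if binary_str[0] == '0':
--             return False
--         num = int(binary_str, 2)
--         if num == 0:
--             return False
--         while num % 5 == 0:
--             num //= 5
--         return num == 1
-- ===== SOURCE B (Python) =====
-- def is_power_of_five(binary_str: str) -> bool:
--     if binary_str[0] == '0':
--         return False
--     num = int(binary_str, 2)
--     p = 1
--     while p < num:
--         p *= 5
--     return p == num
-- ===== Notes on version B (the rewrite author's own statement) =====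
-- stated objective: alternative
-- what changed: B replaces A's divide-num-down-by-5 normalization loop (ending with num == 1) by an upward accumulation of powers of five (p = 1; while p < num: p *= 5; return p == num), which also makes A's explicit num == 0 branch unnecessary.
-- outside the precondition, e.g. on is_power_of_five('+101'): A returns True, B returns True; on is_power_of_five('1_01'): A returns True, B returns True
import Mathlib
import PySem

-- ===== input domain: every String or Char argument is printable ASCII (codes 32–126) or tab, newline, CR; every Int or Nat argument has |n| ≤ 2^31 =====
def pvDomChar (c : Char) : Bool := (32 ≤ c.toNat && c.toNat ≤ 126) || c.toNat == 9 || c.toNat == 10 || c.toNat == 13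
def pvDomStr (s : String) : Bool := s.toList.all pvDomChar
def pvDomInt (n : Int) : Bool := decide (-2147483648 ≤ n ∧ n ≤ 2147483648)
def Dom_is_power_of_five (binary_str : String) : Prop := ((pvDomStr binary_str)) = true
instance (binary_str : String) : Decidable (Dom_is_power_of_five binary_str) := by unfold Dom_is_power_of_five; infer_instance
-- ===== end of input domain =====

-- B changes the power-of-five test from dividing num down by 5 to multiplying a power p up to num (alternative decomposition, same cost).

-- ===== PORT A =====
-- int(binary_str, 2): exact for strings consisting only of '0'/'1' characters (guaranteed by Pre_
-- whenever this value is reached; if the first character is '0' the parse result is never used).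
def pvToBin (l : List Char) : Nat :=
  l.foldl (fun acc c => 2 * acc + (if c = '1' then 1 else 0)) 0

-- `while num % 5 == 0: num //= 5`; the `n = 0` guard is only for Lean totality — A returns
-- before the loop when num == 0, so the loop is never entered with 0.
def pvDivDown (n : Nat) : Nat :=
  if n % 5 = 0 then
    if h : n = 0 then n
    else pvDivDown (n / 5)
  else n
termination_by n
decreasing_by exact Nat.div_lt_self (Nat.pos_of_ne_zero h) (by omega)

def is_power_of_five (binary_str : String) : Bool :=
  match binary_str.toList with
  | [] => false            -- unreachable under Pre_: Python raises IndexError on ""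
  | c :: _ =>
    if c = '0' then false
    else
      let num := pvToBin binary_str.toList
      if num = 0 then false
      else decide (pvDivDown num = 1)

-- ===== PORT B =====
-- `p = 1; while p < num: p *= 5`; the `0 < p` guard is only for Lean totality — B always
-- starts the loop with p = 1 and p only grows.
def pvPowUp (p num : Nat) : Nat :=
  if h : p < num ∧ 0 < p then pvPowUp (p * 5) num else p
termination_by num - p
decreasing_by omega

def is_power_of_five_alt (binary_str : String) : Bool :=
  match binary_str.toList with
  | [] => false            -- unreachable under Pre_: Python raises IndexError on ""
  | c :: _ =>
    if c = '0' then false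
    else
      let num := pvToBin binary_str.toList
      decide (pvPowUp 1 num = num)

-- ===== PRECONDITION & SPEC =====
-- Pre_ excludes "" (A raises IndexError) and, among strings not starting with '0', those that
-- are not plain '0'/'1' strings: on most of them int(s, 2) raises ValueError, but A still
-- returns on Python int-literal extras (leading sign, surrounding whitespace, underscore separators,
-- e.g. '+101' or '1_01'); those exotic literal forms are excluded only because PySem has no
-- base-2 int() — B agrees with A on them (see cites).
def Pre_is_power_of_five (binary_str : String) : Prop :=
  binary_str.toList ≠ [] ∧
    (binary_str.toList.headD '0' = '0' ∨
      (binary_str.toList.all (fun c => c == '0' || c == '1')) = true)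
instance (binary_str : String) : Decidable (Pre_is_power_of_five binary_str) := by
  unfold Pre_is_power_of_five; infer_instance

def pvWitness_is_power_of_five : String := "101"

def Spec_is_power_of_five (binary_str : String) (out : Bool) : Prop := out = is_power_of_five_alt binary_str
instance (binary_str : String) (out : Bool) : Decidable (Spec_is_power_of_five binary_str out) := by unfold Spec_is_power_of_five; infer_instance

-- ===== CLAIM (what is proved, stated in full; the proofs are below) =====
def Claim_equal_is_power_of_five : Prop := ∀ (binary_str : String), Dom_is_power_of_five binary_str → Pre_is_power_of_five binary_str → Spec_is_power_of_five binary_str (is_power_of_five binary_str)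

-- ===== LEMMAS AND PROOFS =====

def IsPow5 (n : Nat) : Prop := ∃ k, n = 5 ^ k

theorem pvToBin_pos (l : List Char) (acc : Nat) (hacc : 1 ≤ acc) :
    1 ≤ l.foldl (fun acc c => 2 * acc + (if c = '1' then 1 else 0)) acc := by
  induction l generalizing acc with
  | nil => exact hacc
  | cons c t ih => exact ih _ (by dsimp only; split <;> omega)

-- A's loop computes 1 exactly on powers of five.
theorem pvDivDown_eq_one (n : Nat) (hn : 1 ≤ n) : pvDivDown n = 1 ↔ IsPow5 n := by
  induction n using Nat.strong_induction_on with
  | _ n ih =>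
    rw [pvDivDown]
    by_cases h5 : n % 5 = 0
    · have hne : n ≠ 0 := by omega
      rw [if_pos h5, dif_neg hne]
      have hdiv : n / 5 < n := Nat.div_lt_self (by omega) (by omega)
      have hd1 : 1 ≤ n / 5 := by omega
      rw [ih _ hdiv hd1]
      constructor
      · rintro ⟨k, hk⟩
        exact ⟨k + 1, by rw [pow_succ]; omega⟩
      · rintro ⟨k, hk⟩
        cases k with
        | zero => omega
        | succ j =>
          refine ⟨j, ?_⟩
          rw [pow_succ] at hk
          omega
    · simp only [if_neg h5]
      constructor
      · intro h; exact ⟨0, by simpa using h⟩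
      · rintro ⟨k, hk⟩
        cases k with
        | zero => simpa using hk
        | succ j =>
          exfalso; apply h5
          rw [pow_succ] at hk
          omega

theorem pvPowUp_isPow5_fuel (d : Nat) : ∀ p num, num - p ≤ d → IsPow5 p → IsPow5 (pvPowUp p num) := by
  induction d with
  | zero =>
    intro p num hd hp
    rw [pvPowUp, dif_neg (by omega)]
    exact hp
  | succ d ih =>
    intro p num hd hp
    rw [pvPowUp]
    by_cases h : p < num ∧ 0 < p
    · rw [dif_pos h]
      exact ih (p * 5) num (by omega)
        (by obtain ⟨k, hk⟩ := hp; exact ⟨k + 1, by rw [pow_succ]; omega⟩)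
    · rw [dif_neg h]; exact hp

theorem pvPowUp_isPow5 (p num : Nat) (hp : IsPow5 p) : IsPow5 (pvPowUp p num) :=
  pvPowUp_isPow5_fuel (num - p) p num le_rfl hp

theorem pvPowUp_reaches_fuel (d : Nat) :
    ∀ p num, num - p ≤ d → p ≤ num → (∃ j k, p = 5 ^ j ∧ num = 5 ^ k) →
      pvPowUp p num = num := by
  induction d with
  | zero =>
    intro p num hd hle h
    rw [pvPowUp, dif_neg (by omega)]
    omega
  | succ d ih =>
    intro p num hd hle h
    obtain ⟨j, k, hj, hk⟩ := h
    have hp1 : 1 ≤ p := by rw [hj]; exact Nat.one_le_pow _ _ (by omega)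
    rw [pvPowUp]
    by_cases hc : p < num ∧ 0 < p
    · rw [dif_pos hc]
      have hjk : j < k := by
        by_contra hge
        have := Nat.pow_le_pow_right (by omega : 1 ≤ 5) (by omega : k ≤ j)
        omega
      have hnext : p * 5 ≤ num := by
        have := Nat.pow_le_pow_right (by omega : 1 ≤ 5) (by omega : j + 1 ≤ k)
        rw [pow_succ] at this
        omega
      exact ih (p * 5) num (by omega) hnext ⟨j + 1, k, by rw [pow_succ]; omega, hk⟩
    · rw [dif_neg hc]
      omega

theorem pvPowUp_reaches (p num : Nat) (hle : p ≤ num)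
    (h : ∃ j k, p = 5 ^ j ∧ num = 5 ^ k) : pvPowUp p num = num :=
  pvPowUp_reaches_fuel (num - p) p num le_rfl hle h

-- B's test agrees with the power-of-five characterisation.
theorem pvPowUp_eq_iff (num : Nat) : pvPowUp 1 num = num ↔ IsPow5 num := by
  constructor
  · intro h
    have := pvPowUp_isPow5 1 num ⟨0, rfl⟩
    rwa [h] at this
  · rintro ⟨k, hk⟩
    exact pvPowUp_reaches 1 num (by rw [hk]; exact Nat.one_le_pow _ _ (by omega))
      ⟨0, k, rfl, hk⟩

-- ===== VERDICT (by name: the statement is the Claim_ definition above) =====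
theorem is_power_of_five_spec : Claim_equal_is_power_of_five := by
  intro s _ hpre
  obtain ⟨hne, hpre⟩ := hpre
  unfold Spec_is_power_of_five is_power_of_five is_power_of_five_alt
  cases hl : s.toList with
  | nil => exact absurd hl hne
  | cons c t =>
    by_cases hc : c = '0'
    · simp [hc]
    · simp only [if_neg hc]
      rw [hl] at hpre
      rcases hpre with h0 | hbin
      · exact absurd (by simpa using h0) hc
      · simp only [List.all_cons, Bool.and_eq_true, Bool.or_eq_true, beq_iff_eq] at hbin
        have hc1 : c = '1' := by
          rcases hbin.1 with h | h
          · exact absurd h hc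
          · exact h
        have hnum : 1 ≤ pvToBin (c :: t) := by
          unfold pvToBin
          simp only [List.foldl_cons]
          exact pvToBin_pos t _ (by simp [hc1])
        rw [if_neg (by omega)]
        have := (pvDivDown_eq_one _ hnum).trans (pvPowUp_eq_iff _).symm
        simp [this]
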